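-- pv_equiv track=rewrite | github.com/haolunc/ARC-RL | reference_solutions/solutions/1bfc4729.py | transform
-- ===== SOURCE A (Python) =====
-- def transform(grid):
--
--     h = len(grid)
--     w = len(grid[0])
--
--     cells = []
--     for r in range(h):
--         for c in range(w):
--             val = grid[r][c]
--             if val != 0:
--                 cells.append((r, c, val))
--     if len(cells) != 2:
--         raise ValueError("Expected exactly two non‑zero cells")
--
--     cells.sort(key=lambda x: x[0])
--     (r1, c1, col1), (r2, c2, col2) = cells
--
--     split = (r1 + r2) // 2 + 1
--
--     out = [[0 for _ in range(w)] for _ in range(h)]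
--
--     for r in range(0, split):
--         out[r][0] = col1
--         out[r][w - 1] = col1
--     for c in range(w):
--         out[0][c] = col1
--         out[r1][c] = col1
--
--     for r in range(split, h):
--         out[r][0] = col2
--         out[r][w - 1] = col2
--     for c in range(w):
--         out[h - 1][c] = col2
--         out[r2][c] = col2
--
--     return out
-- ===== SOURCE B (Python) =====
-- def transform(grid):
--     h = len(grid)
--     w = len(grid[0])
--     cells = [(r, c, grid[r][c]) for r in range(h) for c in range(w) if grid[r][c] != 0]
--     if len(cells) != 2:
--         raise ValueError("Expected exactly two non-zero cells")
--     # scan order is row-major, so cells is already (stably) sorted by row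
--     (r1, c1, col1), (r2, c2, col2) = cells
--     split = (r1 + r2) // 2 + 1
--     return [[col2 if ((r >= split and c in (0, w - 1)) or r == h - 1 or r == r2)
--              else col1 if ((r < split and c in (0, w - 1)) or r == 0 or r == r1)
--              else 0
--              for c in range(w)]
--             for r in range(h)]
-- ===== Notes on version B (the rewrite author's own statement) =====
-- stated objective: simpler
-- what changed: B drops the stable sort (the row-major scan already yields the two cells in row order) and replaces A's blank-grid allocation plus four selective in-place paint loops by a single nested comprehension that classifies every cell, testing the col2 conditions first to reproduce A's overwrite precedence.
import Mathlib
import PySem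

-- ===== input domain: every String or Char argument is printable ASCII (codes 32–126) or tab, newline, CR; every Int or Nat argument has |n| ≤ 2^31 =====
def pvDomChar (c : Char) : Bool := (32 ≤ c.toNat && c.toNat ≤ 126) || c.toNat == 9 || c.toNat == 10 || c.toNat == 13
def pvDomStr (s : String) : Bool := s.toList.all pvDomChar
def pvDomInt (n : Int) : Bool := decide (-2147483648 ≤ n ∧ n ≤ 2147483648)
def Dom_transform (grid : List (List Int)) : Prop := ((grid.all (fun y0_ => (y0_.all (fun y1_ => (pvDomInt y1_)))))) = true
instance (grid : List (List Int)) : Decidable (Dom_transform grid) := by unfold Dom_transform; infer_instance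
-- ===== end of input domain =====

-- B replaces A's four selective paint loops (and the stable sort of an already row-sorted
-- scan) by a single full-grid classifying comprehension; objective: simpler, same cost.

-- ===== PORT A =====
-- out[r][c] = v (in-range Nat indices; out-of-range is a no-op, unreachable in A's paints)
def pvUpd (g : List (List Int)) (r c : Nat) (v : Int) : List (List Int) :=
  g.set r ((g.getD r []).set c v)

def transform (grid : List (List Int)) : List (List Int) :=
  let h := grid.length
  let w := (grid.headD []).length
  let cells := (List.range h).foldl (fun acc r =>
    (List.range w).foldl (fun acc c =>
      let val := (grid.getD r []).getD c 0
      if val != 0 then acc ++ [(r, c, val)] else acc) acc) ([] : List (Nat × Nat × Int))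
  if cells.length ≠ 2 then []   -- Python raises ValueError here (outside Pre_)
  else
    match PySem.List.sorted cells (fun x => x.1) false with
    | [(r1, _c1, col1), (r2, _c2, col2)] =>
      let split := (r1 + r2) / 2 + 1   -- Nat division = Python // on these nonnegative indices
      let out0 := List.replicate h (List.replicate w (0 : Int))
      let out1 := (List.range split).foldl (fun g r => pvUpd (pvUpd g r 0 col1) r (w - 1) col1) out0
      let out2 := (List.range w).foldl (fun g c => pvUpd (pvUpd g 0 c col1) r1 c col1) out1
      let out3 := (List.range' split (h - split)).foldl (fun g r => pvUpd (pvUpd g r 0 col2) r (w - 1) col2) out2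
      (List.range w).foldl (fun g c => pvUpd (pvUpd g (h - 1) c col2) r2 c col2) out3
    | _ => []   -- unreachable: length was checked to be 2

-- ===== PORT B =====
def transform_alt (grid : List (List Int)) : List (List Int) :=
  let h := grid.length
  let w := (grid.headD []).length
  let cells := (List.range h).flatMap (fun r =>
    ((List.range w).filter (fun c => (grid.getD r []).getD c 0 != 0)).map
      (fun c => (r, c, (grid.getD r []).getD c 0)))
  if cells.length ≠ 2 then []   -- Python raises ValueError here (outside Pre_)
  else
    -- tuple unpacking of the two-element list
    let a := cells.headD (0, 0, 0)
    let b := (cells.drop 1).headD (0, 0, 0)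
    let split := (a.1 + b.1) / 2 + 1
    (List.range h).map (fun r => (List.range w).map (fun c =>
      if (split ≤ r ∧ (c = 0 ∨ c = w - 1)) ∨ r = h - 1 ∨ r = b.1 then b.2.2
      else if (r < split ∧ (c = 0 ∨ c = w - 1)) ∨ r = 0 ∨ r = a.1 then a.2.2
      else 0))

-- ===== PRECONDITION & SPEC =====
-- A raises IndexError on an empty grid or a row shorter than the first row, and
-- ValueError unless exactly two cells in the h×w box are non-zero; Pre_ excludes those.
def Pre_transform (grid : List (List Int)) : Prop :=
  grid ≠ [] ∧ (∀ row ∈ grid, (grid.headD []).length ≤ row.length) ∧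
  ((List.range grid.length).flatMap (fun r =>
    (List.range (grid.headD []).length).filter
      (fun c => (grid.getD r []).getD c 0 != 0))).length = 2
instance (grid : List (List Int)) : Decidable (Pre_transform grid) := by unfold Pre_transform; infer_instance

def pvWitness_transform : List (List Int) := [[0, 3, 0], [0, 0, 0], [0, 5, 0]]

def Spec_transform (grid : List (List Int)) (out : List (List Int)) : Prop := out = transform_alt grid
instance (grid : List (List Int)) (out : List (List Int)) : Decidable (Spec_transform grid out) := by unfold Spec_transform; infer_instance

-- ===== CLAIM (what is proved, stated in full; the proofs are below) =====
def Claim_equal_transform : Prop := ∀ (grid : List (List Int)), Dom_transform grid → Pre_transform grid → Spec_transform grid (transform grid)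

-- ===== LEMMAS AND PROOFS =====

-- the value of cell (r, c) of a grid (0 outside)
def pvCell (g : List (List Int)) (r c : Nat) : Int := (g.getD r []).getD c 0

-- rectangular h×w shape
def pvShape (h w : Nat) (g : List (List Int)) : Prop :=
  g.length = h ∧ ∀ row ∈ g, row.length = w

theorem pvShape_upd {h w : Nat} {g : List (List Int)} (hs : pvShape h w g) (r c : Nat) (v : Int) :
    pvShape h w (pvUpd g r c v) := by
  obtain ⟨hl, hr⟩ := hs
  by_cases hrg : r < g.length
  · have hgd : g.getD r [] = g[r] := by
      rw [List.getD_eq_getElem?_getD, List.getElem?_eq_getElem hrg]; rfl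
    refine ⟨by simpa [pvUpd] using hl, ?_⟩
    intro row hrow
    rcases List.mem_or_eq_of_mem_set hrow with h' | h'
    · exact hr _ h'
    · subst h'
      rw [List.length_set, hgd]
      exact hr _ (List.getElem_mem hrg)
  · rw [pvUpd, List.set_eq_of_length_le (by omega)]; exact ⟨hl, hr⟩

theorem pvCell_upd {h w : Nat} {g : List (List Int)} (hs : pvShape h w g)
    (r c : Nat) (v : Int) (r' c' : Nat) (_hr' : r' < h) (_hc' : c' < w) (hr : r < h) (hc : c < w) :
    pvCell (pvUpd g r c v) r' c' = if r' = r ∧ c' = c then v else pvCell g r' c' := by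
  obtain ⟨hl, hrowl⟩ := hs
  have hrg : r < g.length := by omega
  have hgd : g.getD r [] = g[r] := by
    rw [List.getD_eq_getElem?_getD, List.getElem?_eq_getElem hrg]; rfl
  have hrowlen : (g[r]).length = w := hrowl _ (List.getElem_mem hrg)
  by_cases h1 : r' = r
  · have hrow : (pvUpd g r c v).getD r' [] = (g[r]).set c v := by
      rw [pvUpd, h1, List.getD_eq_getElem?_getD, List.getElem?_set, if_pos rfl, if_pos hrg,
        Option.getD_some, hgd]
    by_cases h2 : c' = c
    · rw [if_pos ⟨h1, h2⟩, pvCell, hrow, h2, List.getD_eq_getElem?_getD, List.getElem?_set,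
        if_pos rfl, if_pos (by omega), Option.getD_some]
    · rw [if_neg (fun hh => h2 hh.2), pvCell, hrow, List.getD_eq_getElem?_getD,
        List.getElem?_set, if_neg (fun hh => h2 hh.symm), pvCell, h1, hgd,
        List.getD_eq_getElem?_getD]
  · have hrow : (pvUpd g r c v).getD r' [] = g.getD r' [] := by
      rw [pvUpd, List.getD_eq_getElem?_getD, List.getElem?_set,
        if_neg (fun hh => h1 hh.symm), ← List.getD_eq_getElem?_getD]
    rw [if_neg (fun hh => h1 hh.1), pvCell, hrow, pvCell]

-- phase 1/3 loop: paint both border columns of each row in rs with colour v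
theorem pvCell_borderLoop {h w : Nat} (rs : List Nat) (v : Int) (g : List (List Int))
    (hs : pvShape h w g) (hw : 0 < w) (hrs : ∀ x ∈ rs, x < h) :
    pvShape h w (rs.foldl (fun g r => pvUpd (pvUpd g r 0 v) r (w - 1) v) g) ∧
    ∀ r' c', r' < h → c' < w →
      pvCell (rs.foldl (fun g r => pvUpd (pvUpd g r 0 v) r (w - 1) v) g) r' c' =
        if r' ∈ rs ∧ (c' = 0 ∨ c' = w - 1) then v else pvCell g r' c' := by
  induction rs generalizing g with
  | nil => simpa using hs
  | cons x rest ih =>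
    have hx : x < h := hrs x (List.mem_cons_self)
    have hs1 : pvShape h w (pvUpd (pvUpd g x 0 v) x (w - 1) v) :=
      pvShape_upd (pvShape_upd hs _ _ _) _ _ _
    obtain ⟨hsh, hcell⟩ := ih (pvUpd (pvUpd g x 0 v) x (w - 1) v) hs1
      (fun y hy => hrs y (List.mem_cons_of_mem _ hy))
    refine ⟨hsh, ?_⟩
    intro r' c' hr' hc'
    rw [List.foldl_cons, hcell r' c' hr' hc',
      pvCell_upd (pvShape_upd hs _ _ _) x (w - 1) v r' c' hr' hc' hx (by omega),
      pvCell_upd hs x 0 v r' c' hr' hc' hx hw]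
    by_cases hmem : r' ∈ rest <;> by_cases hb : c' = 0 ∨ c' = w - 1 <;>
      rcases hb' : decide (r' = x) with _ | _ <;>
      simp_all [List.mem_cons] <;> tauto

-- phase 2/4 loop: paint rows a and b at each column in cs with colour v
theorem pvCell_rowLoop {h w : Nat} (cs : List Nat) (a b : Nat) (v : Int) (g : List (List Int))
    (hs : pvShape h w g) (ha : a < h) (hb : b < h) (hcs : ∀ x ∈ cs, x < w) :
    pvShape h w (cs.foldl (fun g c => pvUpd (pvUpd g a c v) b c v) g) ∧
    ∀ r' c', r' < h → c' < w →
      pvCell (cs.foldl (fun g c => pvUpd (pvUpd g a c v) b c v) g) r' c' =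
        if c' ∈ cs ∧ (r' = a ∨ r' = b) then v else pvCell g r' c' := by
  induction cs generalizing g with
  | nil => simpa using hs
  | cons x rest ih =>
    have hx : x < w := hcs x (List.mem_cons_self)
    have hs1 : pvShape h w (pvUpd (pvUpd g a x v) b x v) :=
      pvShape_upd (pvShape_upd hs _ _ _) _ _ _
    obtain ⟨hsh, hcell⟩ := ih (pvUpd (pvUpd g a x v) b x v) hs1
      (fun y hy => hcs y (List.mem_cons_of_mem _ hy))
    refine ⟨hsh, ?_⟩
    intro r' c' hr' hc'
    rw [List.foldl_cons, hcell r' c' hr' hc',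
      pvCell_upd (pvShape_upd hs _ _ _) b x v r' c' hr' hc' hb hx,
      pvCell_upd hs a x v r' c' hr' hc' ha hx]
    by_cases hmem : c' ∈ rest <;> by_cases hb' : r' = a ∨ r' = b <;>
      rcases hx' : decide (c' = x) with _ | _ <;>
      simp_all [List.mem_cons] <;> tauto

-- A's scan produces B's cells list
theorem pvCellsA_eq (grid : List (List Int)) :
    ((List.range grid.length).foldl (fun acc r =>
      (List.range (grid.headD []).length).foldl (fun acc c =>
        if (grid.getD r []).getD c 0 != 0 then acc ++ [(r, c, (grid.getD r []).getD c 0)]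
        else acc) acc) ([] : List (Nat × Nat × Int))) =
    (List.range grid.length).flatMap (fun r =>
      ((List.range (grid.headD []).length).filter (fun c => (grid.getD r []).getD c 0 != 0)).map
        (fun c => (r, c, (grid.getD r []).getD c 0))) := by
  rw [PySem.List.foldl_congr_mem _ _ (fun acc r => acc ++
      ((List.range (grid.headD []).length).filter
        (fun c => (grid.getD r []).getD c 0 != 0)).map
      (fun c => (r, c, (grid.getD r []).getD c 0))) _
    (fun acc r _ => PySem.List.foldl_append_if _ _ _ _),
    PySem.List.foldl_append_eq_flatMap]
  simp

-- B's cells list is nondecreasing in the row component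
theorem pvCells_pairwise (grid : List (List Int)) :
    ((List.range grid.length).flatMap (fun r =>
      ((List.range (grid.headD []).length).filter (fun c => (grid.getD r []).getD c 0 != 0)).map
        (fun c => (r, c, (grid.getD r []).getD c 0)))).Pairwise
      (fun a b => (fun (x : Nat × Nat × Int) => x.1) a ≤ (fun (x : Nat × Nat × Int) => x.1) b) := by
  rw [List.pairwise_flatMap]
  constructor
  · intro r _
    rw [List.pairwise_map]
    exact (List.pairwise_le_range.filter _).imp (fun _ => le_refl r)
  · have : (List.range grid.length).Pairwise (· ≤ ·) := List.pairwise_le_range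
    refine this.imp_of_mem ?_
    intro a b _ _ hab x hx y hy
    simp only [List.mem_map] at hx hy
    obtain ⟨_, _, rfl⟩ := hx; obtain ⟨_, _, rfl⟩ := hy
    exact hab

-- a shaped grid with known cells is the corresponding comprehension
theorem pvGridEq (h w : Nat) (out : List (List Int)) (hs : pvShape h w out)
    (f : Nat → Nat → Int) (hcell : ∀ r c, r < h → c < w → pvCell out r c = f r c) :
    out = (List.range h).map (fun r => (List.range w).map (f r)) := by
  apply List.ext_getElem
  · simp [hs.1]
  intro r hr1 hr2
  have hrh : r < h := by rwa [hs.1] at hr1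
  have hrow : out[r].length = w := hs.2 _ (List.getElem_mem hr1)
  apply List.ext_getElem
  · simp [hrow]
  intro c hc1 hc2
  have hcw : c < w := by rwa [hrow] at hc1
  have hv : pvCell out r c = out[r][c] := by
    rw [pvCell, List.getD_eq_getElem?_getD (l := out), List.getElem?_eq_getElem hr1,
      Option.getD_some, List.getD_eq_getElem?_getD, List.getElem?_eq_getElem hc1,
      Option.getD_some]
  simp only [List.getElem_map, List.getElem_range]
  rw [← hv, hcell r c hrh hcw]

-- the heart of the proof: A's four paint phases over the blank grid equal B's classifier
theorem pvPaintEq (h w r1 r2 : Nat) (col1 col2 : Int)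
    (hr1 : r1 < h) (hr2 : r2 < h) (hw0 : 0 < w) (hr12 : r1 ≤ r2) :
    (List.range w).foldl (fun g c => pvUpd (pvUpd g (h - 1) c col2) r2 c col2)
      ((List.range' ((r1 + r2) / 2 + 1) (h - ((r1 + r2) / 2 + 1))).foldl
        (fun g r => pvUpd (pvUpd g r 0 col2) r (w - 1) col2)
        ((List.range w).foldl (fun g c => pvUpd (pvUpd g 0 c col1) r1 c col1)
          ((List.range ((r1 + r2) / 2 + 1)).foldl
            (fun g r => pvUpd (pvUpd g r 0 col1) r (w - 1) col1)
            (List.replicate h (List.replicate w (0 : Int)))))) =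
    (List.range h).map (fun r => (List.range w).map (fun c =>
      if ((r1 + r2) / 2 + 1 ≤ r ∧ (c = 0 ∨ c = w - 1)) ∨ r = h - 1 ∨ r = r2 then col2
      else if (r < (r1 + r2) / 2 + 1 ∧ (c = 0 ∨ c = w - 1)) ∨ r = 0 ∨ r = r1 then col1
      else 0)) := by
  set split := (r1 + r2) / 2 + 1 with hsplit
  have hsplith : split ≤ h := by
    have : (r1 + r2) / 2 ≤ r2 := by omega
    omega
  have hs0 : pvShape h w (List.replicate h (List.replicate w (0 : Int))) := by
    constructor
    · simp
    · intro row hrow; simp [List.eq_of_mem_replicate hrow]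
  have hcell0 : ∀ r c, pvCell (List.replicate h (List.replicate w (0 : Int))) r c = 0 := by
    intro r c
    simp only [pvCell, List.getD_eq_getElem?_getD, List.getElem?_replicate]
    split_ifs <;> simp
  obtain ⟨hs1, hcell1⟩ := pvCell_borderLoop (List.range split) col1 _ hs0 hw0
    (fun x hx => by simp at hx; omega)
  obtain ⟨hs2, hcell2⟩ := pvCell_rowLoop (List.range w) 0 r1 col1 _ hs1 (by omega) hr1
    (fun x hx => by simpa using hx)
  obtain ⟨hs3, hcell3⟩ := pvCell_borderLoop (List.range' split (h - split)) col2 _ hs2 hw0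
    (fun x hx => by simp [List.mem_range'_1] at hx; omega)
  obtain ⟨hs4, hcell4⟩ := pvCell_rowLoop (List.range w) (h - 1) r2 col2 _ hs3 (by omega) hr2
    (fun x hx => by simpa using hx)
  refine pvGridEq h w _ hs4 (fun r c =>
    if (split ≤ r ∧ (c = 0 ∨ c = w - 1)) ∨ r = h - 1 ∨ r = r2 then col2
    else if (r < split ∧ (c = 0 ∨ c = w - 1)) ∨ r = 0 ∨ r = r1 then col1
    else 0) ?_
  intro r c hrh hcw
  rw [hcell4 r c hrh hcw, hcell3 r c hrh hcw, hcell2 r c hrh hcw, hcell1 r c hrh hcw,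
    hcell0 r c]
  simp only [List.mem_range, List.mem_range'_1]
  split_ifs <;> omega

theorem transform_eq_alt (grid : List (List Int)) : transform grid = transform_alt grid := by
  simp only [transform, transform_alt]
  rw [pvCellsA_eq]
  have hpw := pvCells_pairwise grid
  have hbox : ∀ p ∈ (List.range grid.length).flatMap (fun r =>
      ((List.range (grid.headD []).length).filter
        (fun c => (grid.getD r []).getD c 0 != 0)).map
      (fun c => (r, c, (grid.getD r []).getD c 0))),
      p.1 < grid.length ∧ p.2.1 < (grid.headD []).length := by
    intro p hp
    rw [List.mem_flatMap] at hp
    obtain ⟨r, hr, hp⟩ := hp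
    simp only [List.mem_map, List.mem_filter, List.mem_range] at hp hr
    obtain ⟨c, ⟨hc, _⟩, rfl⟩ := hp
    exact ⟨hr, hc⟩
  obtain ⟨cells, hg⟩ : ∃ cells, (List.range grid.length).flatMap (fun r =>
      ((List.range (grid.headD []).length).filter
        (fun c => (grid.getD r []).getD c 0 != 0)).map
      (fun c => (r, c, (grid.getD r []).getD c 0))) = cells := ⟨_, rfl⟩
  rw [hg] at hpw hbox ⊢
  rcases cells with _ | ⟨⟨r1, c1, col1⟩, _ | ⟨⟨r2, c2, col2⟩, _ | ⟨p3, rest⟩⟩⟩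
  · rfl
  · rfl
  · rw [PySem.List.sorted_eq_self_of_pairwise _ _ hpw, if_neg (by simp), if_neg (by simp)]
    have hr1 : r1 < grid.length := (hbox (r1, c1, col1) (by simp)).1
    have hr2 : r2 < grid.length := (hbox (r2, c2, col2) (by simp)).1
    have hc1 : c1 < (grid.headD []).length := (hbox (r1, c1, col1) (by simp)).2
    have hr12 : r1 ≤ r2 := by
      simpa using (List.pairwise_cons.1 hpw).1 (r2, c2, col2) (by simp)
    exact pvPaintEq grid.length (grid.headD []).length r1 r2 col1 col2 hr1 hr2 (by omega) hr12
  · rw [if_pos (by simp), if_pos (by simp)]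

theorem transform_spec : Claim_equal_transform := by
  intro grid _ _
  unfold Spec_transform
  exact transform_eq_alt grid
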